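-- pv_equiv track=rewrite | github.com/flatironinstitute/DeepFRI | preprocessing/create_nrPDB_GO_annot.py | nr_set
-- ===== SOURCE A (Python) =====
-- def nr_set(chains, pdb2clust):
--     clust2chain = {}
--     for chain in chains:
--         if chain in pdb2clust:
--             c_idx = pdb2clust[chain][0]
--             if c_idx not in clust2chain:
--                 clust2chain[c_idx] = chain
--             else:
--                 _chain = clust2chain[c_idx]
--                 if pdb2clust[chain][1] < pdb2clust[_chain][1]:
--                     clust2chain[c_idx] = chain
--     return set(clust2chain.values())
-- ===== SOURCE B (Python) =====
-- def nr_set(chains, pdb2clust):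
--     # pass 1: annotate the chains present in pdb2clust with (cluster, rank)
--     annotated = [(pdb2clust[c][0], pdb2clust[c][1], c) for c in chains if c in pdb2clust]
--     # pass 2: index cluster -> ordered list of (rank, chain) pairs
--     members = {}
--     for cidx, rank, chain in annotated:
--         members.setdefault(cidx, []).append((rank, chain))
--     # pass 3: reduce each group with min on the cached rank (first minimum wins)
--     return {min(g, key=lambda rc: rc[0])[1] for g in members.values()}
-- ===== Notes on version B (the rewrite author's own statement) =====
-- stated objective: simpler
-- what changed: A keeps a running best-chain-so-far per cluster in one loop, re-looking up the incumbent's rank in pdb2clust at every comparison; B is a staged decomposition: annotate present chains with (cluster, rank), build an index cluster -> ordered (rank, chain) list, then reduce each group with min on the cached rank (first-minimum matches A's strict-< first-wins tie-break).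
import Mathlib
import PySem

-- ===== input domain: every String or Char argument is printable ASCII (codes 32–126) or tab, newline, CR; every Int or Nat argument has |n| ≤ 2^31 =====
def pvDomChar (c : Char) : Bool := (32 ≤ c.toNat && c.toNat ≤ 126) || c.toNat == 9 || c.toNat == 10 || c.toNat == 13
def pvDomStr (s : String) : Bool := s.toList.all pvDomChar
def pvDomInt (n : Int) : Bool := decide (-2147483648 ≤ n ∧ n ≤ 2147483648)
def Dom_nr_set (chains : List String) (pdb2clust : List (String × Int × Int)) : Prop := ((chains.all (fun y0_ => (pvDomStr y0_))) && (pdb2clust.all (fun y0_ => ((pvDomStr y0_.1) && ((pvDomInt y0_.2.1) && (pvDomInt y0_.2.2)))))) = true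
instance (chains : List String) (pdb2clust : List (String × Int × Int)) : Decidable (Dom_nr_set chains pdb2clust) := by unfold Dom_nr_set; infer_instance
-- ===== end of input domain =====

-- B replaces A's single running-best loop (which re-looks up the incumbent's rank on every
-- comparison) by a staged decomposition — annotate, group (rank, chain) pairs per cluster,
-- reduce each group with a first-wins min on the cached rank; objective: simpler.

-- ===== PORT A =====
-- A: one pass keeping, per cluster index, the best chain seen so far (strict < replaces, first wins).
def nr_set (chains : List String) (pdb2clust : List (String × Int × Int)) : List String :=
  let clust2chain : PySem.Dict Int String :=
    chains.foldl (fun d chain =>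
      match pdb2clust.find? (fun p => p.1 == chain) with
      | none => d                                     -- 'if chain in pdb2clust' fails
      | some q =>
        let cidx := q.2.1
        match d.get? cidx with
        | none => d.insert cidx chain
        | some prev =>
          -- pdb2clust[prev] always exists; getD 0 is a total form of the lookup
          if q.2.2 < ((pdb2clust.find? (fun p => p.1 == prev)).map (fun r => r.2.2)).getD 0
          then d.insert cidx chain else d)
      PySem.Dict.empty
  PySem.Set.ofList clust2chain.values

-- ===== PORT B =====
-- B, three stages: the comprehension over present chains yielding (cluster, rank, chain)
-- triples; the setdefault(...).append loop indexing cluster -> ordered (rank, chain) list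
-- (setdefault+append = Dict.modify); min(g, key=rank)[1] per group — groups are nonempty,
-- so getD's default pair is never used.
def nr_set_alt (chains : List String) (pdb2clust : List (String × Int × Int)) : List String :=
  let annotated : List (Int × Int × String) :=
    chains.filterMap (fun c =>
      (pdb2clust.find? (fun p => p.1 == c)).map (fun q => (q.2.1, q.2.2, c)))
  let members : PySem.Dict Int (List (Int × String)) :=
    annotated.foldl (fun d t => d.modify t.1 [] (fun g => g ++ [(t.2.1, t.2.2)]))
      PySem.Dict.empty
  PySem.Set.ofList (members.values.map (fun g =>
    ((PySem.List.min? g (fun rc => rc.1)).getD (0, "")).2))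

-- ===== PRECONDITION & SPEC =====
def Spec_nr_set (chains : List String) (pdb2clust : List (String × Int × Int)) (out : List String) : Prop := out = nr_set_alt chains pdb2clust
instance (chains : List String) (pdb2clust : List (String × Int × Int)) (out : List String) : Decidable (Spec_nr_set chains pdb2clust out) := by unfold Spec_nr_set; infer_instance

-- ===== CLAIM (what is proved, stated in full; the proofs are below) =====
def Claim_equal_nr_set : Prop := ∀ (chains : List String) (pdb2clust : List (String × Int × Int)), Dom_nr_set chains pdb2clust → Spec_nr_set chains pdb2clust (nr_set chains pdb2clust)

-- ===== LEMMAS AND PROOFS =====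

-- the rank A looks up in pdb2clust for a chain
def pvKey (pdb2clust : List (String × Int × Int)) (c : String) : Int :=
  ((pdb2clust.find? (fun p => p.1 == c)).map (fun r => r.2.2)).getD 0

-- B's group -> representative reduction
def pvRep (g : List (Int × String)) : String :=
  ((PySem.List.min? g (fun rc => rc.1)).getD (0, "")).2

-- apply pvRep to every value of a dict
def pvMapVal (d : PySem.Dict Int (List (Int × String))) : PySem.Dict Int String :=
  PySem.Dict.mk (d.items.map (fun p => (p.1, pvRep p.2)))

lemma pvMapVal_get? (d : PySem.Dict Int (List (Int × String))) (k : Int) :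
    (pvMapVal d).get? k = (d.get? k).map pvRep := by
  simp only [pvMapVal, PySem.Dict.get?, List.find?_map]
  have hpred : ((fun p : Int × String => p.1 == k) ∘ fun p : Int × List (Int × String) => (p.1, pvRep p.2))
      = fun p : Int × List (Int × String) => p.1 == k := rfl
  rw [hpred]
  cases hf : List.find? (fun p => p.1 == k) d.items <;> rfl

lemma pvMapVal_contains (d : PySem.Dict Int (List (Int × String))) (k : Int) :
    (pvMapVal d).contains k = d.contains k := by
  rw [PySem.Dict.contains_eq_isSome_get?, PySem.Dict.contains_eq_isSome_get?, pvMapVal_get?]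
  rcases d.get? k with _ | v <;> simp

lemma pvMapVal_keys (d : PySem.Dict Int (List (Int × String))) :
    (pvMapVal d).keys = d.keys := by
  simp [pvMapVal, PySem.Dict.keys]

lemma pvMapVal_insert (d : PySem.Dict Int (List (Int × String)))
    (k : Int) (v : List (Int × String)) :
    pvMapVal (d.insert k v) = (pvMapVal d).insert k (pvRep v) := by
  unfold PySem.Dict.insert
  rw [pvMapVal_contains]
  by_cases h : d.contains k
  · simp only [h, if_true, pvMapVal, List.map_map]
    congr 1
    apply List.map_congr_left
    intro p _
    by_cases hpk : p.1 = k <;> simp [hpk]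
  · simp [h, pvMapVal]

-- min over an appended pair is A's running comparison
lemma pvMin?_append (ms : List (Int × String)) (x : Int × String) :
    PySem.List.min? (ms ++ [x]) (fun rc => rc.1) =
      match PySem.List.min? ms (fun rc => rc.1) with
      | none => some x
      | some m => if x.1 < m.1 then some x else some m := by
  cases h : PySem.List.min? ms (fun rc => rc.1) with
  | none =>
    unfold PySem.List.min? at h ⊢
    rw [List.foldl_append, h]
    rfl
  | some m =>
    unfold PySem.List.min? at h ⊢
    rw [List.foldl_append, h]
    rfl

lemma pvMin?_isSome (ms : List (Int × String)) (h : ms ≠ []) :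
    (PySem.List.min? ms (fun rc => rc.1)).isSome := by
  induction ms using List.reverseRecOn with
  | nil => exact absurd rfl h
  | append_singleton t x _ =>
    rw [pvMin?_append]
    rcases PySem.List.min? t (fun rc => rc.1) with _ | m
    · rfl
    · by_cases hc : x.1 < m.1 <;> simp [hc]

-- overwriting a key with the value it already has, under unique keys, is a no-op
lemma pvInsert_self {ν : Type} (d : PySem.Dict Int ν) (k : Int) (v : ν)
    (hnd : d.keys.Nodup) (h : d.get? k = some v) : d.insert k v = d := by
  apply PySem.Dict.ext
  rw [PySem.Dict.items_insert_of_contains _ v (by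
    rw [PySem.Dict.contains_eq_isSome_get?, h]; rfl)]
  have hmem : (k, v) ∈ d.items := PySem.Dict.mem_items_of_get?_eq_some _ h
  conv_rhs => rw [← List.map_id d.items]
  apply List.map_congr_left
  intro p hp
  by_cases hpk : p.1 == k
  · have hk : p.1 = k := by simpa using hpk
    have : p = (k, v) := by
      have hnd' : d.items.map Prod.fst |>.Nodup := hnd
      rcases p with ⟨pk, pv⟩
      cases hk
      have := List.inj_on_of_nodup_map hnd' hp hmem rfl
      exact this ▸ rfl
    simp [this]
  · simp [hpk]

-- B's foldl over the annotated list is a foldl over chains (the comprehension fused in)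
lemma pvAnnot_foldl (p2c : List (String × Int × Int)) (chains : List String)
    (d0 : PySem.Dict Int (List (Int × String))) :
    (chains.filterMap (fun c =>
        (p2c.find? (fun p => p.1 == c)).map (fun q => (q.2.1, q.2.2, c)))).foldl
      (fun d t => d.modify t.1 [] (fun g => g ++ [(t.2.1, t.2.2)])) d0
    = chains.foldl (fun d chain =>
        match p2c.find? (fun p => p.1 == chain) with
        | none => d
        | some q => d.modify q.2.1 [] (fun g => g ++ [(q.2.2, chain)])) d0 := by
  induction chains generalizing d0 with
  | nil => rfl
  | cons c rest ih =>
    simp only [List.filterMap_cons, List.foldl_cons]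
    cases h : p2c.find? (fun p => p.1 == c) with
    | none => simpa using ih d0
    | some q => simpa using ih _

-- the main loop invariant: A's dict is B's dict with every group reduced by pvRep;
-- every stored pair carries the rank A would re-look up (hcoh)
lemma pvLoop_eq (p2c : List (String × Int × Int)) (chains : List String)
    (d : PySem.Dict Int (List (Int × String)))
    (hne : ∀ p ∈ d.items, p.2 ≠ [])
    (hcoh : ∀ p ∈ d.items, ∀ rc ∈ p.2, rc.1 = pvKey p2c rc.2)
    (hnd : d.keys.Nodup) :
    chains.foldl (fun d chain =>
      match p2c.find? (fun p => p.1 == chain) with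
      | none => d
      | some q =>
        match d.get? q.2.1 with
        | none => d.insert q.2.1 chain
        | some prev =>
          if q.2.2 < ((p2c.find? (fun p => p.1 == prev)).map (fun r => r.2.2)).getD 0
          then d.insert q.2.1 chain else d) (pvMapVal d)
    = pvMapVal (chains.foldl (fun d chain =>
      match p2c.find? (fun p => p.1 == chain) with
      | none => d
      | some q => d.modify q.2.1 [] (fun g => g ++ [(q.2.2, chain)])) d) := by
  induction chains generalizing d with
  | nil => rfl
  | cons chain rest ih =>
    simp only [List.foldl_cons]
    cases hq : p2c.find? (fun p => p.1 == chain) with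
    | none => exact ih d hne hcoh hnd
    | some q =>
      have hkeyc : pvKey p2c chain = q.2.2 := by simp [pvKey, hq]
      cases hd : d.get? q.2.1 with
      | none =>
        have hget : (pvMapVal d).get? q.2.1 = none := by rw [pvMapVal_get?, hd]; rfl
        have hgetD : d.getD q.2.1 [] = [] := by simp [PySem.Dict.getD, hd]
        simp only [hget, PySem.Dict.modify, hgetD, List.nil_append]
        have hrep : pvRep [(q.2.2, chain)] = chain := by simp [pvRep, PySem.List.min?]
        rw [show (pvMapVal d).insert q.2.1 chain = pvMapVal (d.insert q.2.1 [(q.2.2, chain)]) by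
          rw [pvMapVal_insert, hrep]]
        refine ih _ ?_ ?_ (PySem.Dict.nodup_keys_insert _ _ _ hnd)
        · intro p hp
          rcases (PySem.Dict.mem_items_insert _ _ _ _).1 hp with h | h
          · rw [h]; simp
          · exact hne p h.1
        · intro p hp rc hrc
          rcases (PySem.Dict.mem_items_insert _ _ _ _).1 hp with h | h
          · rw [h] at hrc
            simp only [List.mem_singleton] at hrc
            rw [hrc, hkeyc]
          · exact hcoh p h.1 rc hrc
      | some g =>
        have hitem : (q.2.1, g) ∈ d.items := PySem.Dict.mem_items_of_get?_eq_some _ hd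
        have hg : g ≠ [] := hne _ hitem
        obtain ⟨m, hm⟩ := Option.isSome_iff_exists.1 (pvMin?_isSome g hg)
        have hmmem : m ∈ g := PySem.List.min?_mem hm
        have hmcoh : m.1 = pvKey p2c m.2 := hcoh _ hitem m hmmem
        have hget : (pvMapVal d).get? q.2.1 = some (pvRep g) := by
          rw [pvMapVal_get?, hd]; rfl
        have hgetD : d.getD q.2.1 [] = g := by simp [PySem.Dict.getD, hd]
        have hrepg : pvRep g = m.2 := by simp [pvRep, hm]
        have hkeyrep : ((p2c.find? (fun p => p.1 == pvRep g)).map (fun r => r.2.2)).getD 0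
            = m.1 := by rw [hrepg, hmcoh]; rfl
        have hrepapp : pvRep (g ++ [(q.2.2, chain)]) =
            if q.2.2 < m.1 then chain else m.2 := by
          rw [pvRep, pvMin?_append, hm]
          by_cases hlt : q.2.2 < m.1 <;> simp [hlt]
        have hargs : ∀ d' : PySem.Dict Int (List (Int × String)),
            d' = d.insert q.2.1 (g ++ [(q.2.2, chain)]) →
            (∀ p ∈ d'.items, p.2 ≠ []) ∧
            (∀ p ∈ d'.items, ∀ rc ∈ p.2, rc.1 = pvKey p2c rc.2) ∧ d'.keys.Nodup := by
          intro d' hd'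
          subst hd'
          refine ⟨?_, ?_, PySem.Dict.nodup_keys_insert _ _ _ hnd⟩
          · intro p hp
            rcases (PySem.Dict.mem_items_insert _ _ _ _).1 hp with h | h
            · rw [h]; simp
            · exact hne p h.1
          · intro p hp rc hrc
            rcases (PySem.Dict.mem_items_insert _ _ _ _).1 hp with h | h
            · rw [h] at hrc
              simp only [List.mem_append, List.mem_singleton] at hrc
              rcases hrc with h1 | h1
              · exact hcoh _ hitem rc h1
              · rw [h1, hkeyc]
            · exact hcoh p h.1 rc hrc
        obtain ⟨hne', hcoh', hnd'⟩ := hargs _ rfl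
        simp only [hget, PySem.Dict.modify, hgetD, hkeyrep]
        by_cases hlt : q.2.2 < m.1
        · simp only [hlt, if_true]
          rw [show (pvMapVal d).insert q.2.1 chain
              = pvMapVal (d.insert q.2.1 (g ++ [(q.2.2, chain)])) by
            rw [pvMapVal_insert, hrepapp, if_pos hlt]]
          exact ih _ hne' hcoh' hnd'
        · simp only [hlt, if_false]
          have hmv : pvMapVal (d.insert q.2.1 (g ++ [(q.2.2, chain)])) = pvMapVal d := by
            rw [pvMapVal_insert, hrepapp, if_neg hlt, ← hrepg,
              pvInsert_self _ _ _ (by rw [pvMapVal_keys]; exact hnd) hget]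
          rw [← hmv]
          exact ih _ hne' hcoh' hnd'

-- ===== VERDICT (by name: the statement is the Claim_ definition above) =====
theorem nr_set_spec : Claim_equal_nr_set := by
  intro chains p2c _
  show nr_set chains p2c = nr_set_alt chains p2c
  unfold nr_set nr_set_alt
  dsimp only
  rw [pvAnnot_foldl]
  have h := pvLoop_eq p2c chains PySem.Dict.empty (by intro p hp; cases hp)
    (by intro p hp; cases hp) (by simp [PySem.Dict.keys, PySem.Dict.empty])
  have hempty : pvMapVal PySem.Dict.empty = PySem.Dict.empty := rfl
  rw [hempty] at h
  rw [h]
  simp only [pvMapVal, PySem.Dict.values, List.map_map]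
  rfl
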